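-- pv_equiv track=rewrite | github.com/Smagicom/TechOrda | python/сложные задачи/results.py | perfectly_balanced
-- ===== SOURCE A (Python) =====
-- def perfectly_balanced(array):
--     total_sum = sum(array)
--     left_sum = 0
--     for i in range(len(array)):
--         if left_sum == (total_sum - left_sum - array[i]):
--             return True
--         left_sum += array[i]
--     return False
-- ===== SOURCE B (Python) =====
-- def perfectly_balanced(array):
--     for i in range(len(array)):
--         if sum(array[:i]) == sum(array[i + 1:]):
--             return True
--     return False
-- ===== Notes on version B (the rewrite author's own statement) =====
-- stated objective: simpler
-- what changed: Replaces the running total/left-sum accumulator pass with a direct per-index check that the slice before i and the slice after i sum equally.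
import Mathlib
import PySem

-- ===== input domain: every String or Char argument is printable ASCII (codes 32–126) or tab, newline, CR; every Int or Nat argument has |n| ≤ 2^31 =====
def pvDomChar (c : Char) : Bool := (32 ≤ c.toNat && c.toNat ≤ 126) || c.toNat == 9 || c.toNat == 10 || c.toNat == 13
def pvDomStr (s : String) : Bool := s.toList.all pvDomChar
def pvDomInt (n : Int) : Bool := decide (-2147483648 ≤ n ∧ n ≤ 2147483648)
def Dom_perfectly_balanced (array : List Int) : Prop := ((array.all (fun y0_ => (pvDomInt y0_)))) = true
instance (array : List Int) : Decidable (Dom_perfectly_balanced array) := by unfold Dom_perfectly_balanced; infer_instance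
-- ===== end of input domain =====

-- B replaces A's running left-sum accumulator with a per-index check that the
-- slice before i and the slice after i sum equally (objective: simpler).

-- ===== PORT A =====
-- loop 'for i in range(len(array))' carrying left_sum, with early return
def pbA_go (array : List Int) (total : Int) (left : Int) (i : Nat) : Bool :=
  if h : i < array.length then
    if left = total - left - array[i] then true
    else pbA_go array total (left + array[i]) (i + 1)
  else false
termination_by array.length - i

def perfectly_balanced (array : List Int) : Bool :=
  pbA_go array array.sum 0 0

-- ===== PORT B =====
-- loop 'for i in range(len(array))' comparing sum(array[:i]) with sum(array[i+1:])
def pbB_go (array : List Int) (i : Nat) : Bool :=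
  if i < array.length then
    if (PySem.List.slice array none (some (i : Int))).sum
        = (PySem.List.slice array (some ((i : Nat) + 1 : Int)) none).sum then true
    else pbB_go array (i + 1)
  else false
termination_by array.length - i

def perfectly_balanced_alt (array : List Int) : Bool :=
  pbB_go array 0

-- ===== PRECONDITION & SPEC =====
def Spec_perfectly_balanced (array : List Int) (out : Bool) : Prop := out = perfectly_balanced_alt array
instance (array : List Int) (out : Bool) : Decidable (Spec_perfectly_balanced array out) := by unfold Spec_perfectly_balanced; infer_instance

-- ===== CLAIM (what is proved, stated in full; the proofs are below) =====
def Claim_equal_perfectly_balanced : Prop := ∀ (array : List Int), Dom_perfectly_balanced array → Spec_perfectly_balanced array (perfectly_balanced array)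

-- ===== LEMMAS AND PROOFS =====

-- sum splits around position i
theorem pv_sum_split (array : List Int) (i : Nat) (h : i < array.length) :
    array.sum = (array.take i).sum + array[i] + (array.drop (i + 1)).sum := by
  conv_lhs => rw [← List.take_append_drop i array]
  rw [List.sum_append, List.drop_eq_getElem_cons h, List.sum_cons]
  ring

-- loop invariant: A's loop from index i with left = sum of the first i elements
-- computes the same as B's loop from index i
theorem pv_go_eq (array : List Int) (i : Nat) :
    pbA_go array array.sum ((array.take i).sum) i = pbB_go array i := by
  by_cases h : i < array.length
  · rw [pbA_go, pbB_go]
    simp only [h, dif_pos, if_pos]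
    have hsplit := pv_sum_split array i h
    have hslice1 : PySem.List.slice array none (some (i : Int)) = array.take i :=
      PySem.List.slice_to_natCast array i
    have hslice2 : PySem.List.slice array (some ((i : Nat) + 1 : Int)) none
        = array.drop (i + 1) := by
      have := PySem.List.slice_from_natCast array (i + 1)
      simpa using this
    rw [hslice1, hslice2]
    have hiff : ((array.take i).sum = array.sum - (array.take i).sum - array[i])
        ↔ ((array.take i).sum = (array.drop (i + 1)).sum) := by omega
    by_cases hc : (array.take i).sum = (array.drop (i + 1)).sum
    · rw [if_pos (hiff.mpr hc), if_pos hc]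
    · rw [if_neg (fun hx => hc (hiff.mp hx)), if_neg hc]
      have htake : array.take (i + 1) = array.take i ++ [array[i]] :=
        List.take_succ_eq_append_getElem h
      have : (array.take (i + 1)).sum = (array.take i).sum + array[i] := by
        rw [htake, List.sum_append, List.sum_singleton]
      rw [← this]
      exact pv_go_eq array (i + 1)
  · rw [pbA_go, pbB_go]
    simp [h]
termination_by array.length - i
decreasing_by omega

-- ===== VERDICT (by name: the statement is the Claim_ definition above) =====
theorem perfectly_balanced_spec : Claim_equal_perfectly_balanced := by
  intro array _
  unfold Spec_perfectly_balanced perfectly_balanced perfectly_balanced_alt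
  have := pv_go_eq array 0
  simpa using this
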